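-- pv_equiv track=rewrite | github.com/Anusi-Patel/Information_Security | Vigenere_Cipher.py | adjust_key
-- ===== SOURCE A (Python) =====
-- def adjust_key(plaintext, keys):
--     plain_length = len(plaintext)
--     key_length = len(keys)
--     while key_length != plain_length:
--         if key_length > plain_length:
--             keys = keys[:plain_length]
--         elif key_length < plain_length:
--             keys = (keys * (plain_length // key_length + 1))[:plain_length]
--         key_length = len(keys)
--     return keys
-- ===== SOURCE B (Python) =====
-- def adjust_key(plaintext, keys):
--     return ''.join(keys[i % len(keys)] for i in range(len(plaintext)))
-- ===== Notes on version B (the rewrite author's own statement) =====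
-- stated objective: idiomatic
-- what changed: Replaced the fixpoint while-loop that repeatedly multiplies/slices the key string with a single modulo-indexed join comprehension over the plaintext positions.
import Mathlib
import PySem

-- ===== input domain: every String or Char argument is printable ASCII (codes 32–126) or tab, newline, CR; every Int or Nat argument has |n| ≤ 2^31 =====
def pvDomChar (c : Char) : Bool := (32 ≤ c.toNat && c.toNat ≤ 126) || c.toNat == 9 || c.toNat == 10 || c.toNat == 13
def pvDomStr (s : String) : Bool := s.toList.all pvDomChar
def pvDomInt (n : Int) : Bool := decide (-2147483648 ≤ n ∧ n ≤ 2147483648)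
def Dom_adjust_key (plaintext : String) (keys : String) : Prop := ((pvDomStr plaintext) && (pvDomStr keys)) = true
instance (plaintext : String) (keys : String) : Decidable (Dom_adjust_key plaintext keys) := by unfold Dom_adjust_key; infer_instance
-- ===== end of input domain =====

-- B replaces A's multiply-and-slice fixpoint loop with one modulo-indexed comprehension (idiomatic; same cost).

-- ===== PORT A =====
-- the while-loop, with fuel as a totality guard only (inside Pre_ the loop exits after ≤ 1 adjustment);
-- keys[:n] → take n, keys * m → flatten (replicate m keys); plain_length // key_length is only reached
-- with key_length > 0 inside Pre_ (Python raises ZeroDivisionError at key_length = 0, excluded by Pre_).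
def adjustLoop (pl : Nat) (keys : List Char) : Nat → List Char
  | 0 => keys
  | fuel + 1 =>
    if keys.length = pl then keys
    else if keys.length > pl then adjustLoop pl (keys.take pl) fuel
    else adjustLoop pl (((List.replicate (pl / keys.length + 1) keys).flatten).take pl) fuel

def adjust_key (plaintext : String) (keys : String) : String :=
  String.ofList (adjustLoop plaintext.toList.length keys.toList (plaintext.toList.length + 2))

-- ===== PORT B =====
-- keys[i % len(keys)] → getD with a dummy default, never used: 0 ≤ i % kl < kl inside Pre_.
def adjust_key_alt (plaintext : String) (keys : String) : String :=
  String.ofList ((List.range plaintext.toList.length).map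
    (fun i => keys.toList.getD (i % keys.toList.length) ' '))

-- ===== PRECONDITION & SPEC =====
-- Pre_ excludes exactly the inputs where A (and B) raise ZeroDivisionError: empty keys with nonempty plaintext.
def Pre_adjust_key (plaintext : String) (keys : String) : Prop := keys ≠ "" ∨ plaintext = ""
instance (plaintext : String) (keys : String) : Decidable (Pre_adjust_key plaintext keys) := by unfold Pre_adjust_key; infer_instance
def pvWitness_adjust_key : String × String := ("HELLOWORLD", "KEY")

def Spec_adjust_key (plaintext : String) (keys : String) (out : String) : Prop := out = adjust_key_alt plaintext keys
instance (plaintext : String) (keys : String) (out : String) : Decidable (Spec_adjust_key plaintext keys out) := by unfold Spec_adjust_key; infer_instance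

-- ===== CLAIM (what is proved, stated in full; the proofs are below) =====
def Claim_equal_adjust_key : Prop := ∀ (plaintext : String) (keys : String), Dom_adjust_key plaintext keys → Pre_adjust_key plaintext keys → Spec_adjust_key plaintext keys (adjust_key plaintext keys)

-- ===== LEMMAS AND PROOFS =====

-- the canonical cyclic extension both programs compute
def cyc (keys : List Char) (n : Nat) : List Char :=
  (List.range n).map (fun i => keys.getD (i % keys.length) ' ')

theorem length_flatten_replicate (m : Nat) (l : List Char) :
    ((List.replicate m l).flatten).length = m * l.length := by
  induction m with
  | zero => simp
  | succ m ih => simp [List.replicate_succ, ih, Nat.succ_mul]; ring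

theorem getElem?_flatten_replicate (m : Nat) (l : List Char) (i : Nat) (h : i < m * l.length) :
    ((List.replicate m l).flatten)[i]? = l[i % l.length]? := by
  induction m generalizing i with
  | zero => simp at h
  | succ m ih =>
    have hl : 0 < l.length := by
      rcases Nat.eq_zero_or_pos l.length with h0 | h0
      · simp [h0] at h
      · exact h0
    rw [List.replicate_succ, List.flatten_cons]
    by_cases hi : i < l.length
    · rw [List.getElem?_append_left hi, Nat.mod_eq_of_lt hi]
    · have hi' : l.length ≤ i := Nat.le_of_not_lt hi
      rw [List.getElem?_append_right hi', ih]
      · congr 1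
        conv_rhs => rw [← Nat.sub_add_cancel hi']
        rw [Nat.add_mod_right]
      · have hh : (m + 1) * l.length = m * l.length + l.length := by ring
        omega

theorem take_flatten_replicate_eq_cyc (m n : Nat) (l : List Char)
    (hl : 0 < l.length) (hn : n ≤ m * l.length) :
    ((List.replicate m l).flatten).take n = cyc l n := by
  apply List.ext_getElem?
  intro i
  by_cases hi : i < n
  · rw [List.getElem?_take]
    simp only [hi, if_pos]
    rw [getElem?_flatten_replicate m l i (lt_of_lt_of_le hi hn)]
    have hmod : i % l.length < l.length := Nat.mod_lt _ hl
    simp [cyc, List.getElem?_map, List.getElem?_range hi, List.getD_eq_getElem?_getD,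
      List.getElem?_eq_getElem hmod]
  · rw [List.getElem?_take]
    simp only [hi, if_neg, not_false_iff]
    have : ((List.range n).map (fun i => l.getD (i % l.length) ' ')).length = n := by simp
    simp [cyc]
    omega

theorem take_eq_cyc (n : Nat) (l : List Char) (hn : n ≤ l.length) :
    l.take n = cyc l n := by
  have h0 : 0 < l.length ∨ n = 0 := by omega
  apply List.ext_getElem?
  intro i
  by_cases hi : i < n
  · have hil : i < l.length := lt_of_lt_of_le hi hn
    rw [List.getElem?_take]
    simp only [hi, if_pos]
    have : i % l.length = i := Nat.mod_eq_of_lt hil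
    simp [cyc, List.getElem?_range hi, this, List.getD_eq_getElem?_getD,
      List.getElem?_eq_getElem hil]
  · rw [List.getElem?_take]
    simp only [hi, if_neg, not_false_iff]
    simp [cyc]
    omega

theorem self_eq_cyc (l : List Char) : l = cyc l l.length := by
  conv_lhs => rw [← List.take_length (l := l)]
  exact take_eq_cyc l.length l le_rfl

theorem adjustLoop_eq_cyc (pl : Nat) (keys : List Char)
    (h : keys ≠ [] ∨ pl = 0) :
    adjustLoop pl keys (pl + 2) = cyc keys pl := by
  rcases Nat.lt_trichotomy keys.length pl with hlt | heq | hgt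
  · -- kl < pl : one multiply-and-slice step, then the lengths agree
    have hk : 0 < keys.length := by
      rcases h with h | h
      · exact List.length_pos_of_ne_nil h
      · omega
    have hle : pl ≤ (pl / keys.length + 1) * keys.length := by
      have := Nat.lt_div_mul_add (a := pl) hk
      have hh : (pl / keys.length + 1) * keys.length = pl / keys.length * keys.length + keys.length := by ring
      omega
    have hcyc := take_flatten_replicate_eq_cyc (pl / keys.length + 1) pl keys hk hle
    have hlen : (((List.replicate (pl / keys.length + 1) keys).flatten).take pl).length = pl := by
      rw [List.length_take, length_flatten_replicate]
      omega
    rw [show pl + 2 = (pl + 1) + 1 from rfl]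
    unfold adjustLoop
    rw [if_neg (Nat.ne_of_lt hlt), if_neg (by omega : ¬ keys.length > pl)]
    unfold adjustLoop
    rw [if_pos hlen]
    exact hcyc
  · -- kl = pl : loop never runs
    rw [show pl + 2 = (pl + 1) + 1 from rfl]
    unfold adjustLoop
    rw [if_pos heq, ← heq]
    exact self_eq_cyc keys
  · -- kl > pl : one truncation step, then the lengths agree
    have hlen : (keys.take pl).length = pl := by
      rw [List.length_take]; omega
    rw [show pl + 2 = (pl + 1) + 1 from rfl]
    unfold adjustLoop
    rw [if_neg (by omega : ¬ keys.length = pl), if_pos hgt]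
    unfold adjustLoop
    rw [if_pos hlen]
    exact take_eq_cyc pl keys (le_of_lt hgt)

-- ===== VERDICT (by name: the statement is the Claim_ definition above) =====
theorem adjust_key_spec : Claim_equal_adjust_key := by
  intro plaintext keys _ hpre
  unfold Spec_adjust_key adjust_key adjust_key_alt
  congr 1
  apply adjustLoop_eq_cyc
  rcases hpre with h | h
  · left
    intro hc
    exact h (String.toList_eq_nil_iff.mp hc)
  · right
    simp [h]
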